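-- pv_equiv track=rewrite | github.com/RotemWeissman96/Python---play-with-sound | wave_editor.py | slow_down_filter
-- ===== SOURCE A (Python) =====
-- def average_pairs(list_of_lists):
--     """
--     gets list of pairs and calculate the average of all the first argument
--     in all pairs as well as the second one
--     returns a pair with the averages
--     :param list_of_lists: list of lists
--     :return: average (list)
--     """
--     if not list_of_lists:  # if list is empty
--         return []
--     average = [0, 0]
--     for pair in range(len(list_of_lists)):
--         average[0] += list_of_lists[pair][0]
--         average[1] += list_of_lists[pair][1]
--     average[0] = int(average[0]/len(list_of_lists))
--     average[1] = int(average[1]/len(list_of_lists))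
--     return average
--
-- def slow_down_filter(audio_data):
--     """
--     adds the average of every pair of values between them. The first one is
--     the average of the firsts ones and the second of the seconds.
--     :param audio_data: list of lists
--     :return: new_audio_data: list of lists
--     """
--     new_audio_data = []
--     for i in range(len(audio_data)*2 - 1):
--         if i % 2 == 0:
--             new_audio_data.append(audio_data[i//2])
--         else:
--             new_audio_data.append(average_pairs([audio_data[i//2],
--                                                  audio_data[i//2 + 1]]))
--     return new_audio_data
-- ===== SOURCE B (Python) =====
-- def slow_down_filter(audio_data):
--     """Table-then-fill: precompute the averages table, preallocate the output
--     buffer of length 2n-1, and fill even/odd slots by strided slice assignment."""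
--     n = len(audio_data)
--     if n == 0:
--         return []
--     averages = [[int((a[0] + b[0]) / 2), int((a[1] + b[1]) / 2)]
--                 for a, b in zip(audio_data, audio_data[1:])]
--     result = [None] * (2 * n - 1)
--     result[0::2] = audio_data
--     result[1::2] = averages
--     return result
-- ===== Notes on version B (the rewrite author's own statement) =====
-- stated objective: alternative
-- what changed: Replaced A's single flat append loop over range(2n-1) with i%2/i//2 modulo dispatch and a generic list-averaging helper by a staged build: a comprehension computes the table of adjacent-pair averages, then a preallocated buffer of length 2n-1 is filled by two strided slice assignments (originals into even slots, averages into odd slots).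
import Mathlib
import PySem

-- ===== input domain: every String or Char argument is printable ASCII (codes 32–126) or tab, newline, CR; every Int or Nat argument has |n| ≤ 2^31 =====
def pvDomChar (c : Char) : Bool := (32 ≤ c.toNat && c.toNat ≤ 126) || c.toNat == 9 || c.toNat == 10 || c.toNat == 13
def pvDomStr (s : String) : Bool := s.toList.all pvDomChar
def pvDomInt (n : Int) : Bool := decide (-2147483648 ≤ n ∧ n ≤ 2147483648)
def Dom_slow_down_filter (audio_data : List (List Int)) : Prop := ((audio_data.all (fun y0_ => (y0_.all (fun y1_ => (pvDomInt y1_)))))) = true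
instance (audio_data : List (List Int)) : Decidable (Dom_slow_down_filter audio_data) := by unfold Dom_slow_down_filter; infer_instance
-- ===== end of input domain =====

-- B replaces A's flat range(2n-1) loop with i%2 dispatch by a staged build: averages table, then strided interleave (alternative decomposition).


-- ===== PORT A =====
def average_pairs (list_of_lists : List (List Int)) : List Int :=
  if list_of_lists = [] then []
  else
    let n : Int := PySem.List.len list_of_lists
    -- the mutated 2-slot 'average' list is carried as a pair of running sums
    let s : Int × Int :=
      (PySem.List.pyRange 0 n 1).foldl
        (fun (a : Int × Int) pair =>
          (a.1 + PySem.List.pyGetD (PySem.List.pyGetD list_of_lists pair []) 0 0,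
           a.2 + PySem.List.pyGetD (PySem.List.pyGetD list_of_lists pair []) 1 0))
        (0, 0)
    -- int(sum/len): float division then truncation = PySem.Int.truncdiv on this domain
    [PySem.Int.truncdiv s.1 n, PySem.Int.truncdiv s.2 n]

def slow_down_filter (audio_data : List (List Int)) : List (List Int) :=
  (PySem.List.pyRange 0 ((PySem.List.len audio_data) * 2 - 1) 1).foldl
    (fun acc i =>
      if PySem.Int.mod i 2 = 0 then
        acc ++ [PySem.List.pyGetD audio_data (PySem.Int.floordiv i 2) []]
      else
        acc ++ [average_pairs [PySem.List.pyGetD audio_data (PySem.Int.floordiv i 2) [],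
                               PySem.List.pyGetD audio_data (PySem.Int.floordiv i 2 + 1) []]])
    []

-- ===== PORT B =====
-- B's comprehension entry: int((a[0]+b[0])/2) — float division then truncation = truncdiv on this domain
def pairAvg (a b : List Int) : List Int :=
  [PySem.Int.truncdiv (PySem.List.pyGetD a 0 0 + PySem.List.pyGetD b 0 0) 2,
   PySem.Int.truncdiv (PySem.List.pyGetD a 1 0 + PySem.List.pyGetD b 1 0) 2]

-- the averages table: [pairAvg a b for a, b in zip(audio_data, audio_data[1:])]
def avgTable (audio_data : List (List Int)) : List (List Int) :=
  (audio_data.zip (PySem.List.slice audio_data (some 1) none)).map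
    (fun ab => pairAvg ab.1 ab.2)

-- exact semantics of 'result[0::2] = evens; result[1::2] = odds' on a buffer of
-- length 2*len(evens)-1 when len(evens) = len(odds)+1 (always the case in B)
def strideFill2 : List (List Int) → List (List Int) → List (List Int)
  | [], _ => []
  | x :: xs, [] => x :: strideFill2 xs []
  | x :: xs, y :: ys => x :: y :: strideFill2 xs ys

def slow_down_filter_alt (audio_data : List (List Int)) : List (List Int) :=
  if PySem.List.len audio_data = 0 then []
  else strideFill2 audio_data (avgTable audio_data)

-- ===== PRECONDITION & SPEC =====
-- Pre_ excludes the inputs on which both programs raise IndexError: two or more samples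
-- while some sample has fewer than two channels (the averaging step indexes [0] and [1]).
def Pre_slow_down_filter (audio_data : List (List Int)) : Prop :=
  audio_data.length ≤ 1 ∨ ∀ m ∈ audio_data, 2 ≤ m.length
instance (audio_data : List (List Int)) : Decidable (Pre_slow_down_filter audio_data) := by
  unfold Pre_slow_down_filter; infer_instance

def pvWitness_slow_down_filter : List (List Int) := [[1, 2], [3, 4], [6, 8]]

def Spec_slow_down_filter (audio_data : List (List Int)) (out : List (List Int)) : Prop :=
  out = slow_down_filter_alt audio_data
instance (audio_data : List (List Int)) (out : List (List Int)) :
    Decidable (Spec_slow_down_filter audio_data out) := by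
  unfold Spec_slow_down_filter; infer_instance

-- ===== CLAIM (what is proved, stated in full; the proofs are below) =====
def Claim_equal_slow_down_filter : Prop :=
  ∀ (audio_data : List (List Int)), Dom_slow_down_filter audio_data →
    Pre_slow_down_filter audio_data →
    Spec_slow_down_filter audio_data (slow_down_filter audio_data)

-- ===== LEMMAS AND PROOFS =====

-- common recursive shape both programs compute
def ilv : List (List Int) → List (List Int)
  | [] => []
  | [x] => [x]
  | x :: y :: t => x :: pairAvg x y :: ilv (y :: t)

lemma alt_eq_ilv (l : List (List Int)) : slow_down_filter_alt l = ilv l := by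
  induction l with
  | nil => rfl
  | cons x t ih =>
    cases t with
    | nil =>
      simp [slow_down_filter_alt, avgTable, strideFill2, ilv, PySem.List.slice_from_one,
            PySem.List.len]
    | cons y t' =>
      unfold slow_down_filter_alt at ih ⊢
      rw [if_neg (by simp [PySem.List.len]; omega), ilv]
      rw [if_neg (by simp [PySem.List.len]; omega)] at ih
      rw [show avgTable (x :: y :: t') = pairAvg x y :: avgTable (y :: t') from by
        simp [avgTable, PySem.List.slice_from_one]]
      rw [strideFill2, ← ih]

lemma avg2 (x y : List Int) :
    average_pairs [x, y] = pairAvg x y := by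
  have : PySem.List.pyRange 0 2 1 = [0, 1] := by decide
  simp [average_pairs, pairAvg, this, PySem.List.pyGetD, PySem.List.pyGet?, PySem.List.pyIdx?]

lemma pyGetD_cons_succ' (x : List Int) (xs : List (List Int)) (j : Int) (d : List Int)
    (h0 : 0 ≤ j) :
    PySem.List.pyGetD (x :: xs) (j + 1) d = PySem.List.pyGetD xs j d := by
  obtain ⟨n, rfl⟩ : ∃ n : Nat, j = (n : Int) := ⟨j.toNat, by omega⟩
  rw [show (n : Int) + 1 = ((n + 1 : Nat) : Int) by push_cast; ring]
  rw [PySem.List.pyGetD_natCast, PySem.List.pyGetD_natCast]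
  simp [List.getD]

-- A as a map over the index range
lemma A_map (l : List (List Int)) :
    slow_down_filter l =
      (PySem.List.pyRange 0 ((l.length : Int) * 2 - 1) 1).map
        (fun i =>
          if PySem.Int.mod i 2 = 0 then
            PySem.List.pyGetD l (PySem.Int.floordiv i 2) []
          else
            average_pairs [PySem.List.pyGetD l (PySem.Int.floordiv i 2) [],
                           PySem.List.pyGetD l (PySem.Int.floordiv i 2 + 1) []]) := by
  unfold slow_down_filter
  rw [show (fun (acc : List (List Int)) i =>
      if PySem.Int.mod i 2 = 0 then
        acc ++ [PySem.List.pyGetD l (PySem.Int.floordiv i 2) []]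
      else
        acc ++ [average_pairs [PySem.List.pyGetD l (PySem.Int.floordiv i 2) [],
                               PySem.List.pyGetD l (PySem.Int.floordiv i 2 + 1) []]]) =
      (fun acc i => acc ++ [if PySem.Int.mod i 2 = 0 then
        PySem.List.pyGetD l (PySem.Int.floordiv i 2) []
      else
        average_pairs [PySem.List.pyGetD l (PySem.Int.floordiv i 2) [],
                       PySem.List.pyGetD l (PySem.Int.floordiv i 2 + 1) []]]) from by
    funext acc i; split <;> rfl]
  rw [PySem.List.foldl_append_singleton_eq_map]
  simp [PySem.List.len_eq]

lemma A_eq_ilv (l : List (List Int)) (hpre : Pre_slow_down_filter l) :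
    slow_down_filter l = ilv l := by
  induction l with
  | nil => decide
  | cons x t ih =>
    cases t with
    | nil =>
      rw [A_map]
      simp only [List.length_cons, List.length_nil]
      rw [show ((0 + 1 : Nat) : Int) * 2 - 1 = 0 + 1 by norm_num,
          PySem.List.pyRange_one_singleton]
      simp [ilv, PySem.List.pyGetD_zero_cons, PySem.Int.mod, PySem.Int.floordiv]
    | cons y t' =>
      have hlens' : ∀ m ∈ y :: t', 2 ≤ m.length := by
        rcases hpre with h | h
        · simp at h
        · exact fun m hm => h m (by simp [hm])
      have ihy := ih (Or.inr hlens')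
      rw [A_map] at ihy
      set n' : Int := ((y :: t').length : Int) with hn'
      have hn'pos : 1 ≤ n' := by simp [hn']
      have hlen : ((x :: y :: t').length : Int) * 2 - 1 = 2 * n' + 1 := by
        simp [hn']; ring
      rw [A_map]
      simp only [hlen]
      rw [PySem.List.pyRange_one_cons (by omega), PySem.List.pyRange_one_cons (by omega)]
      simp only [List.map_cons]
      have hmaps :
          (PySem.List.pyRange (0 + 1 + 1) (2 * n' + 1) 1).map
            (fun i =>
              if PySem.Int.mod i 2 = 0 then
                PySem.List.pyGetD (x :: y :: t') (PySem.Int.floordiv i 2) []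
              else
                average_pairs [PySem.List.pyGetD (x :: y :: t') (PySem.Int.floordiv i 2) [],
                  PySem.List.pyGetD (x :: y :: t') (PySem.Int.floordiv i 2 + 1) []]) =
          (PySem.List.pyRange 0 (n' * 2 - 1) 1).map
            (fun i =>
              if PySem.Int.mod i 2 = 0 then
                PySem.List.pyGetD (y :: t') (PySem.Int.floordiv i 2) []
              else
                average_pairs [PySem.List.pyGetD (y :: t') (PySem.Int.floordiv i 2) [],
                  PySem.List.pyGetD (y :: t') (PySem.Int.floordiv i 2 + 1) []]) := by
        rw [PySem.List.pyRange_one (0 + 1 + 1) (2 * n' + 1),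
            PySem.List.pyRange_one 0 (n' * 2 - 1), List.map_map, List.map_map]
        rw [show (2 * n' + 1 - (0 + 1 + 1)).toNat = (n' * 2 - 1 - 0).toNat by omega]
        apply List.map_congr_left
        intro k hk
        simp only [List.mem_range] at hk
        have hkb : (k : Int) < n' * 2 - 1 := by omega
        simp only [Function.comp_apply]
        have hm : PySem.Int.mod ((0 : Int) + 1 + 1 + k) 2 = PySem.Int.mod ((0 : Int) + k) 2 := by
          rw [PySem.Int.mod_eq_emod_of_pos (by norm_num),
              PySem.Int.mod_eq_emod_of_pos (by norm_num)]
          omega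
        have hd : PySem.Int.floordiv ((0 : Int) + 1 + 1 + k) 2 =
            PySem.Int.floordiv ((0 : Int) + k) 2 + 1 := by
          rw [PySem.Int.floordiv_eq_ediv_of_pos (by norm_num),
              PySem.Int.floordiv_eq_ediv_of_pos (by norm_num)]
          omega
        have hq0 : 0 ≤ PySem.Int.floordiv ((0 : Int) + k) 2 := by
          rw [PySem.Int.floordiv_eq_ediv_of_pos (by norm_num)]; omega
        rw [hm, hd]
        split
        · rw [pyGetD_cons_succ' x (y :: t') _ [] hq0]
        · rw [pyGetD_cons_succ' x (y :: t') _ [] hq0,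
              show PySem.Int.floordiv ((0 : Int) + (k : Int)) 2 + 1 + 1 =
                (PySem.Int.floordiv ((0 : Int) + (k : Int)) 2 + 1) + 1 from rfl,
              pyGetD_cons_succ' x (y :: t') _ [] (by omega)]
      rw [hmaps, ihy]
      have h0 : PySem.Int.mod (0 : Int) 2 = 0 := by decide
      have h1 : PySem.Int.mod (0 + 1 : Int) 2 ≠ 0 := by decide
      have hf0 : PySem.Int.floordiv (0 : Int) 2 = 0 := by decide
      have hf1 : PySem.Int.floordiv (0 + 1 : Int) 2 = 0 := by decide
      rw [if_pos h0, if_neg h1, hf0, hf1]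
      rw [PySem.List.pyGetD_zero_cons]
      rw [show (0 : Int) + 1 = (0 : Int) + 1 from rfl]
      rw [show PySem.List.pyGetD (x :: y :: t') (0 + 1) [] = y by
        rw [pyGetD_cons_succ' x (y :: t') 0 [] le_rfl, PySem.List.pyGetD_zero_cons]]
      rw [avg2 x y]
      rfl

-- ===== VERDICT (by name: the statement is the Claim_ definition above) =====
theorem slow_down_filter_spec : Claim_equal_slow_down_filter := by
  intro l _ hpre
  unfold Spec_slow_down_filter
  rw [alt_eq_ilv, A_eq_ilv l hpre]
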